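-- pv_equiv track=rewrite | github.com/paul-ljh/algo-practice | interview_log/easy/anagram_difference.py | anagram_difference
-- ===== SOURCE A (Python) =====
-- def anagram_difference(s, t):
--   if len(s) != len(t):
--     return -1
--   d = {}
--   for char in s:
--     d[char] = d.get(char, 0) + 1
--
--   result = 0
--   for char in t:
--     if char not in d:
--       result += 1
--     else:
--       d[char] -= 1
--       if d[char] == 0:
--         d.pop(char)
--   return result
-- ===== SOURCE B (Python) =====
-- from collections import Counter
--
--
-- def anagram_difference(s, t):
--     if len(s) != len(t):
--         return -1
--     cs = Counter(s)
--     ct = Counter(t)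
--     return sum(max(0, v - cs[c]) for c, v in ct.items())
-- ===== Notes on version B (the rewrite author's own statement) =====
-- stated objective: idiomatic
-- what changed: Replaced A's single mutating decrement-and-pop pass over t with two independent Counter builds and one comparison pass summing the surplus of t over s, max(0, ct[c]-cs[c]).
import Mathlib
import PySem

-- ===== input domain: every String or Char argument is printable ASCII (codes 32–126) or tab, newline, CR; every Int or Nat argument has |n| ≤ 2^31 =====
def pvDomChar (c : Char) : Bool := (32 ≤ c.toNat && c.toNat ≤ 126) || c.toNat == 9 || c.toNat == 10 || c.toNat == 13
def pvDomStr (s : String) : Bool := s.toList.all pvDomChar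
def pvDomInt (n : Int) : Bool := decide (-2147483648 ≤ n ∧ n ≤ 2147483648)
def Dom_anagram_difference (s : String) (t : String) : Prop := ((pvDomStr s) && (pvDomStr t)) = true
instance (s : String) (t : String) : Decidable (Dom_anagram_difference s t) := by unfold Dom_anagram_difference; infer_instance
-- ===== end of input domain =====

-- B replaces A's single mutating decrement-and-pop pass with two Counter builds
-- and one comparison pass summing t's surplus over s (idiomatic; same cost).


-- ===== PORT A =====
-- body of A's second loop: 'if char not in d: result += 1 else: d[char] -= 1; if d[char] == 0: d.pop(char)'
-- ('d[char] -= 1' on an existing key is 'insert char (getD char 0 - 1)', exact since the branch guarantees the key is present)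
def anagram_difference_loop (st : PySem.Dict Char Int × Int) (c : Char) : PySem.Dict Char Int × Int :=
  if st.1.contains c = false then (st.1, st.2 + 1)
  else
    let d' := st.1.insert c (st.1.getD c 0 - 1)
    if d'.getD c 0 = 0 then (d'.erase c, st.2) else (d', st.2)

def anagram_difference (s : String) (t : String) : Int :=
  if PySem.Str.len s ≠ PySem.Str.len t then -1
  else
    let d := s.toList.foldl (fun d c => d.insert c (d.getD c 0 + 1)) PySem.Dict.empty
    (t.toList.foldl anagram_difference_loop (d, 0)).2

-- ===== PORT B =====
def anagram_difference_alt (s : String) (t : String) : Int :=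
  if PySem.Str.len s ≠ PySem.Str.len t then -1
  else
    let cs := PySem.Dict.counter s.toList
    let ct := PySem.Dict.counter t.toList
    (ct.items.map (fun p => max 0 (p.2 - cs.getD p.1 0))).sum

-- ===== PRECONDITION & SPEC =====
def Spec_anagram_difference (s : String) (t : String) (out : Int) : Prop := out = anagram_difference_alt s t
instance (s : String) (t : String) (out : Int) : Decidable (Spec_anagram_difference s t out) := by unfold Spec_anagram_difference; infer_instance

-- ===== CLAIM (what is proved, stated in full; the proofs are below) =====
def Claim_equal_anagram_difference : Prop := ∀ (s : String) (t : String), Dom_anagram_difference s t → Spec_anagram_difference s t (anagram_difference s t)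

-- ===== LEMMAS AND PROOFS =====

theorem dict_get?_erase {κ ν : Type} [BEq κ] [LawfulBEq κ] [DecidableEq κ] (d : PySem.Dict κ ν) (k k' : κ) :
    (d.erase k).get? k' = if k' = k then none else d.get? k' := by
  obtain ⟨items⟩ := d
  simp only [PySem.Dict.erase, PySem.Dict.get?]
  induction items with
  | nil => simp
  | cons p rest ih =>
    by_cases h1 : p.1 = k <;> by_cases h2 : p.1 = k' <;>
      simp_all

theorem dict_getD_erase {κ ν : Type} [BEq κ] [LawfulBEq κ] [DecidableEq κ] (d : PySem.Dict κ ν) (k k' : κ) (d0 : ν) :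
    (d.erase k).getD k' d0 = if k' = k then d0 else d.getD k' d0 := by
  simp only [PySem.Dict.getD, dict_get?_erase]
  split <;> rfl

theorem dict_contains_erase {κ ν : Type} [BEq κ] [LawfulBEq κ] [DecidableEq κ] (d : PySem.Dict κ ν) (k k' : κ) :
    (d.erase k).contains k' = if k' = k then false else d.contains k' := by
  rw [PySem.Dict.contains_eq_isSome_get?, dict_get?_erase]
  split
  · rfl
  · rw [PySem.Dict.contains_eq_isSome_get?]

-- the surplus of c :: l over a table m, when the table holds no c
theorem sumEx_cons_zero (m : Char → Int) (l : List Char) (c : Char) (h : m c = 0) :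
    (∑ x ∈ (c :: l).toFinset, max 0 ((List.count x (c :: l) : Int) - m x))
      = (∑ x ∈ l.toFinset, max 0 ((List.count x l : Int) - m x)) + 1 := by
  rw [List.toFinset_cons]
  by_cases hmem : c ∈ l.toFinset
  · rw [Finset.insert_eq_self.mpr hmem]
    rw [← Finset.add_sum_erase _ _ hmem, ← Finset.add_sum_erase _ _ hmem]
    have htail : ∀ x ∈ l.toFinset.erase c,
        max 0 ((List.count x (c :: l) : Int) - m x) = max 0 ((List.count x l : Int) - m x) := by
      intro x hx
      rw [List.count_cons_of_ne (Ne.symm (Finset.ne_of_mem_erase hx))]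
    rw [Finset.sum_congr rfl htail, List.count_cons_self, h]
    push_cast
    omega
  · rw [Finset.sum_insert hmem]
    have hnot : c ∉ l := fun hc => hmem (List.mem_toFinset.mpr hc)
    have htail : ∀ x ∈ l.toFinset,
        max 0 ((List.count x (c :: l) : Int) - m x) = max 0 ((List.count x l : Int) - m x) := by
      intro x hx
      have hcx : c ≠ x := fun he => hnot (by rw [he]; exact List.mem_toFinset.mp hx)
      rw [List.count_cons_of_ne hcx]
    rw [Finset.sum_congr rfl htail, List.count_cons_self, h,
        List.count_eq_zero_of_not_mem hnot]
    push_cast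
    omega

-- the surplus of c :: l over m equals the surplus of l over m with one more c matched
theorem sumEx_cons_pos (m m' : Char → Int) (l : List Char) (c : Char)
    (h : 0 < m c) (hc : m' c = m c - 1) (hoff : ∀ x, x ≠ c → m' x = m x) :
    (∑ x ∈ (c :: l).toFinset, max 0 ((List.count x (c :: l) : Int) - m x))
      = ∑ x ∈ l.toFinset, max 0 ((List.count x l : Int) - m' x) := by
  rw [List.toFinset_cons]
  by_cases hmem : c ∈ l.toFinset
  · rw [Finset.insert_eq_self.mpr hmem]
    rw [← Finset.add_sum_erase _ (fun x => max 0 ((List.count x (c :: l) : Int) - m x)) hmem,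
        ← Finset.add_sum_erase _ (fun x => max 0 ((List.count x l : Int) - m' x)) hmem]
    have hhead : max 0 ((List.count c (c :: l) : Int) - m c)
        = max 0 ((List.count c l : Int) - m' c) := by
      rw [List.count_cons_self, hc]
      push_cast
      omega
    rw [hhead]
    congr 1
    apply Finset.sum_congr rfl
    intro x hx
    rw [List.count_cons_of_ne (Ne.symm (Finset.ne_of_mem_erase hx)),
        hoff x (Finset.ne_of_mem_erase hx)]
  · rw [Finset.sum_insert hmem]
    have hnot : c ∉ l := fun hcl => hmem (List.mem_toFinset.mpr hcl)
    have hhead : max 0 ((List.count c (c :: l) : Int) - m c) = 0 := by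
      rw [List.count_cons_self, List.count_eq_zero_of_not_mem hnot]
      push_cast
      omega
    rw [hhead]
    have htail : ∀ x ∈ l.toFinset,
        max 0 ((List.count x (c :: l) : Int) - m x) = max 0 ((List.count x l : Int) - m' x) := by
      intro x hx
      have hxc : x ≠ c := fun he => hnot (he ▸ List.mem_toFinset.mp hx)
      rw [List.count_cons_of_ne (Ne.symm hxc), hoff x hxc]
    rw [Finset.sum_congr rfl htail]
    omega

-- invariant of A's second loop: from any table whose stored entries are exactly the
-- positive values, the loop adds the list's surplus over the table to the accumulator
theorem loopA_spec (l : List Char) (d : PySem.Dict Char Int) (r : Int)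
    (H : ∀ c, d.contains c = true ↔ 0 < d.getD c 0) :
    (l.foldl anagram_difference_loop (d, r)).2
      = r + ∑ x ∈ l.toFinset, max 0 ((List.count x l : Int) - d.getD x 0) := by
  induction l generalizing d r with
  | nil => simp
  | cons c l ih =>
    rw [List.foldl_cons]
    by_cases hc : d.contains c = false
    · have h0 : d.getD c 0 = 0 := PySem.Dict.getD_of_not_contains d 0 hc
      have hstep : anagram_difference_loop (d, r) c = (d, r + 1) := by
        simp [anagram_difference_loop, hc]
      rw [hstep, ih d (r + 1) H, sumEx_cons_zero _ _ _ h0]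
      ring
    · have hc' : d.contains c = true := by revert hc; cases d.contains c <;> simp
      have hpos : 0 < d.getD c 0 := (H c).mp hc'
      have hd' : ∀ x, (d.insert c (d.getD c 0 - 1)).getD x 0
          = if x = c then d.getD c 0 - 1 else d.getD x 0 := fun x =>
        PySem.Dict.getD_insert d c x _ 0
      by_cases hv : (d.insert c (d.getD c 0 - 1)).getD c 0 = 0
      · -- the decremented count hit 0: the key is popped
        have hstep : anagram_difference_loop (d, r) c
            = ((d.insert c (d.getD c 0 - 1)).erase c, r) := by
          simp [anagram_difference_loop, hc', hv]
        set d2 := (d.insert c (d.getD c 0 - 1)).erase c with hd2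
        have hget2 : ∀ x, d2.getD x 0 = if x = c then 0 else d.getD x 0 := by
          intro x
          rw [hd2, dict_getD_erase, hd']
          split <;> simp_all
        have H2 : ∀ x, d2.contains x = true ↔ 0 < d2.getD x 0 := by
          intro x
          rw [hd2, dict_contains_erase, dict_getD_erase, hd']
          by_cases hx : x = c
          · simp [hx]
          · simp only [if_neg hx]
            rw [PySem.Dict.contains_insert]
            simp only [show (x == c) = false from by simp [hx], Bool.false_or]
            exact H x
        have hmc1 : d.getD c 0 = 1 := by
          have h := hv
          rw [hd' c] at h
          simp at h
          omega
        rw [hstep, ih d2 r H2,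
            sumEx_cons_pos (fun x => d.getD x 0) (fun x => d2.getD x 0) l c hpos
              (by show d2.getD c 0 = d.getD c 0 - 1; rw [hget2]; simp [hmc1])
              (fun x hx => by show d2.getD x 0 = d.getD x 0; rw [hget2]; simp [hx])]
      · -- the decremented count is still positive: the key stays
        have hv' : ¬ d.getD c 0 - 1 = 0 := by
          rw [hd' c, if_pos rfl] at hv
          exact hv
        have hstep : anagram_difference_loop (d, r) c
            = (d.insert c (d.getD c 0 - 1), r) := by
          simp [anagram_difference_loop, hc', hv']
        set d2 := d.insert c (d.getD c 0 - 1) with hd2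
        have hget2 : ∀ x, d2.getD x 0 = if x = c then d.getD c 0 - 1 else d.getD x 0 := hd'
        have H2 : ∀ x, d2.contains x = true ↔ 0 < d2.getD x 0 := by
          intro x
          rw [hd2, PySem.Dict.contains_insert]
          by_cases hx : x = c
          · subst hx
            rw [hget2 x, if_pos rfl]
            simp only [beq_self_eq_true, Bool.true_or, true_iff]
            omega
          · rw [hget2 x, if_neg hx]
            simp only [show (x == c) = false from by simp [hx], Bool.false_or]
            exact H x
        rw [hstep, ih d2 r H2,
            sumEx_cons_pos (fun x => d.getD x 0) (fun x => d2.getD x 0) l c hpos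
              (by show d2.getD c 0 = d.getD c 0 - 1; rw [hget2]; simp)
              (fun x hx => by show d2.getD x 0 = d.getD x 0; rw [hget2]; simp [hx])]

-- ===== VERDICT =====
theorem anagram_difference_spec : Claim_equal_anagram_difference := by
  unfold Claim_equal_anagram_difference Spec_anagram_difference
  intro s t _
  unfold anagram_difference anagram_difference_alt
  by_cases hlen : PySem.Str.len s ≠ PySem.Str.len t
  · rw [if_pos hlen, if_pos hlen]
  · rw [if_neg hlen, if_neg hlen]
    rw [PySem.Dict.foldl_insert_getD_add_one_eq_counter]
    have H : ∀ c, (PySem.Dict.counter s.toList).contains c = true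
        ↔ 0 < (PySem.Dict.counter s.toList).getD c 0 := by
      intro c
      rw [PySem.Dict.contains_counter, PySem.Dict.getD_counter]
      simp [List.count_pos_iff]
    rw [loopA_spec t.toList (PySem.Dict.counter s.toList) 0 H, zero_add]
    -- B's side: the items of Counter(t) are the distinct chars of t with their counts
    show _ = (((PySem.Dict.counter t.toList).items).map
      (fun p => max 0 (p.2 - (PySem.Dict.counter s.toList).getD p.1 0))).sum
    rw [PySem.Dict.items_counter, List.map_map]
    rw [← List.sum_toFinset _ (PySem.Set.nodup_ofList t.toList)]
    have hfin : (List.toFinset (PySem.Set.ofList t.toList)) = t.toList.toFinset := by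
      ext x
      simp [PySem.Set.mem_ofList]
    rw [hfin]
    apply Finset.sum_congr rfl
    intro x _
    simp [Function.comp, PySem.Dict.getD_counter]
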